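-- pv_equiv track=rewrite | github.com/humehta/Projects | Optical Character Recognition/probability.py | find_emission
-- ===== SOURCE A (Python) =====
-- def find_emission(train_data,test_data):
--     emission={i:{} for i in range(len(test_data))}
--     for k in range(len(test_data)):
--         for s in states:
--             prob=[1 if test_data[k][i][j]==train_data[s][i][j] \
--                                else 0 for i in range(len(test_data[k])) \
--                                for j in range(len(test_data[k][0])) \
--                                                 if test_data[k][i][j]=='*']
--             emission[k][s]=sum(prob)+1
--     return emission
--
-- states=['A','B','C','D','E','F','G','H','I','J','K','L','M','N','O','P','Q','R',\
--         'S','T','U','V','W','X','Y','Z','a','b','c','d','e','f','g','h','i','j',\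
--         'k','l','m','n','o','p','q','r','s','t','u','v','w','x','y','z','0','1',\
--         '2','3','4','5','6','7','8','9','(',')',',','.','-','!','?','"','\'',' ']
-- ===== SOURCE B (Python) =====
-- states=['A','B','C','D','E','F','G','H','I','J','K','L','M','N','O','P','Q','R',\
--         'S','T','U','V','W','X','Y','Z','a','b','c','d','e','f','g','h','i','j',\
--         'k','l','m','n','o','p','q','r','s','t','u','v','w','x','y','z','0','1',\
--         '2','3','4','5','6','7','8','9','(',')',',','.','-','!','?','"','\'',' ']
--
-- def find_emission(train_data, test_data):
--     # per-state set of coordinates whose template pixel is '*'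
--     state_stars = {s: {(i, j)
--                        for i, row in enumerate(train_data.get(s, []))
--                        for j, c in enumerate(row) if c == '*'}
--                    for s in states}
--     emission = {}
--     for k, grid in enumerate(test_data):
--         ncols = len(grid[0]) if grid else 0
--         test_stars = {(i, j)
--                       for i, row in enumerate(grid)
--                       for j, c in enumerate(row) if j < ncols and c == '*'}
--         emission[k] = {s: len(test_stars & state_stars[s]) + 1 for s in states}
--     return emission
-- ===== Notes on version B (the rewrite author's own statement) =====
-- stated objective: faster
-- what changed: Instead of re-scanning every pixel position for each (test char, state) pair, B precomputes for each state the set of coordinates of its '*' pixels, builds each test char's star-coordinate set once, and scores each state by set intersection size.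
import Mathlib
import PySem

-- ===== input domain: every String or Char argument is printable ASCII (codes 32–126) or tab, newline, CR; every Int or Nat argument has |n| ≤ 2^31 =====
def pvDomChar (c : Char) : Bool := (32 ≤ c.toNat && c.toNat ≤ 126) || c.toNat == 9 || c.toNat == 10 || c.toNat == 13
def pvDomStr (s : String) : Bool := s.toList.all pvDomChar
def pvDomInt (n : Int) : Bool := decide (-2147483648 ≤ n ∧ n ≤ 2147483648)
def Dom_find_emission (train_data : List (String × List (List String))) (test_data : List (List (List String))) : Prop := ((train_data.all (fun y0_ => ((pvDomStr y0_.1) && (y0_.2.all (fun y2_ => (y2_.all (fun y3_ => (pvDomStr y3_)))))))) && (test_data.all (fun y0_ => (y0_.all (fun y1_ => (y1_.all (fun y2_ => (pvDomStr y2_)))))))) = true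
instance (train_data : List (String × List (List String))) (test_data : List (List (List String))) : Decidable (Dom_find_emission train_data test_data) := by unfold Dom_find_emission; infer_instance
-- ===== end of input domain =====

-- B replaces the per-(test char, state) per-pixel positional comparison by precomputed
-- star-coordinate sets per state template intersected with each test char's star set (alternative algorithm, same result).


-- ===== PORT A =====
def pvStates : List String := ["A","B","C","D","E","F","G","H","I","J","K","L","M","N","O","P","Q","R",
        "S","T","U","V","W","X","Y","Z","a","b","c","d","e","f","g","h","i","j",
        "k","l","m","n","o","p","q","r","s","t","u","v","w","x","y","z","0","1",
        "2","3","4","5","6","7","8","9","(",")",",",".","-","!","?","\"","'"," "]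

-- the list comprehension 'prob' for one test char k and one state s
def pvProb (train_data : List (String × List (List String))) (test_data : List (List (List String)))
    (k : Int) (s : String) : List Int :=
  let g := PySem.List.pyGetD test_data k []
  let t := PySem.Dict.getD (PySem.Dict.mk train_data) s []
  (PySem.List.pyRange 0 (g.length : Int) 1).flatMap (fun i =>
    (PySem.List.pyRange 0 ((PySem.List.pyGetD g 0 []).length : Int) 1).filterMap (fun j =>
      if PySem.List.pyGetD (PySem.List.pyGetD g i []) j "" = "*" then
        some (if PySem.List.pyGetD (PySem.List.pyGetD g i []) j ""
                = PySem.List.pyGetD (PySem.List.pyGetD t i []) j "" then (1 : Int) else 0)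
      else none))

-- the body of 'for k in range(len(test_data)):' (inner loop over states)
def pvBodyA (train_data : List (String × List (List String))) (test_data : List (List (List String)))
    (em : PySem.Dict Int (PySem.Dict String Int)) (k : Int) : PySem.Dict Int (PySem.Dict String Int) :=
  pvStates.foldl (fun em s =>
    PySem.Dict.insert em k
      (PySem.Dict.insert (PySem.Dict.getD em k PySem.Dict.empty) s ((pvProb train_data test_data k s).sum + 1))) em

def find_emission (train_data : List (String × List (List String))) (test_data : List (List (List String))) : List (Int × List (String × Int)) :=
  let emission0 : PySem.Dict Int (PySem.Dict String Int) :=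
    PySem.Dict.mk ((PySem.List.pyRange 0 (test_data.length : Int) 1).map (fun i => (i, PySem.Dict.empty)))
  let emission := (PySem.List.pyRange 0 (test_data.length : Int) 1).foldl (pvBodyA train_data test_data) emission0
  emission.items.map (fun p => (p.1, p.2.items))

-- ===== PORT B =====
-- set comprehension {(i, j) for i, row in enumerate(rows) for j, c in enumerate(row) if cond(j, c)}
def pvStarList (rows : List (List String)) (cond : Int → String → Bool) : List (Int × Int) :=
  (PySem.List.enumerate rows 0).flatMap (fun p =>
    (PySem.List.enumerate p.2 0).filterMap (fun q =>
      if cond q.1 q.2 then some (p.1, q.1) else none))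

def pvStars (rows : List (List String)) : PySem.Set (Int × Int) :=
  PySem.Set.ofList (pvStarList rows (fun _ c => c == "*"))

def pvTestStars (grid : List (List String)) (ncols : Int) : PySem.Set (Int × Int) :=
  PySem.Set.ofList (pvStarList grid (fun j c => decide (j < ncols) && (c == "*")))

def find_emission_alt (train_data : List (String × List (List String))) (test_data : List (List (List String))) : List (Int × List (String × Int)) :=
  let state_stars : PySem.Dict String (PySem.Set (Int × Int)) :=
    PySem.Dict.mk (pvStates.map (fun s => (s, pvStars (PySem.Dict.getD (PySem.Dict.mk train_data) s []))))
  (PySem.List.enumerate test_data 0).map (fun p =>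
    let ncols : Int := match p.2 with | [] => 0 | r :: _ => (r.length : Int)
    let tstars := pvTestStars p.2 ncols
    (p.1, pvStates.map (fun s =>
      (s, ((PySem.Set.inter tstars (PySem.Dict.getD state_stars s PySem.Set.empty)).length : Int) + 1))))

-- ===== PRECONDITION & SPEC =====
-- for one pixel (i, j): every state's template exists and is large enough (train_data[s][i][j] would not raise)
def pvOkTrain (train_data : List (String × List (List String))) (i j : Nat) : Bool :=
  pvStates.all (fun s =>
    match (PySem.Dict.mk train_data).get? s with
    | none => false
    | some t => decide (i < t.length) && decide (j < (t.getD i []).length))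

-- Pre_ excludes exactly the inputs on which A raises (IndexError on a test row shorter than row 0,
-- or KeyError/IndexError looking up a state template at a '*' pixel); A returns on every input satisfying Pre_.
def Pre_find_emission (train_data : List (String × List (List String))) (test_data : List (List (List String))) : Prop :=
  ∀ g ∈ test_data, ∀ i < g.length, ∀ j < (g.headD []).length,
    j < (g.getD i []).length ∧
    ((g.getD i []).getD j "" = "*" → pvOkTrain train_data i j = true)
instance (train_data : List (String × List (List String))) (test_data : List (List (List String))) : Decidable (Pre_find_emission train_data test_data) := by unfold Pre_find_emission; infer_instance

def pvWitness_find_emission : (List (String × List (List String))) × List (List (List String)) :=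
  ([], [[["."]]])

def Spec_find_emission (train_data : List (String × List (List String))) (test_data : List (List (List String))) (out : List (Int × List (String × Int))) : Prop := out = find_emission_alt train_data test_data
instance (train_data : List (String × List (List String))) (test_data : List (List (List String))) (out : List (Int × List (String × Int))) : Decidable (Spec_find_emission train_data test_data out) := by unfold Spec_find_emission; infer_instance

-- ===== CLAIM (what is proved, stated in full; the proofs are below) =====
def Claim_equal_find_emission : Prop := ∀ (train_data : List (String × List (List String))) (test_data : List (List (List String))), Dom_find_emission train_data test_data → Pre_find_emission train_data test_data → Spec_find_emission train_data test_data (find_emission train_data test_data)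


-- ===== LEMMAS AND PROOFS =====

-- ---- generic list facts ----
theorem pv_filterMap_ite {A B : Type} (l : List A) (p : A → Prop) [DecidablePred p] (f : A → B) :
    l.filterMap (fun x => if p x then some (f x) else none) = (l.filter (fun x => decide (p x))).map f := by
  induction l with
  | nil => rfl
  | cons x t ih => by_cases h : p x <;> simp [h, ih]

theorem pv_sum_flatMap {A : Type} (l : List A) (f : A → List Int) :
    (l.flatMap f).sum = (l.map (fun a => (f a).sum)).sum := by
  induction l with
  | nil => rfl
  | cons x t ih => simp [List.flatMap_cons, ih]

theorem pv_countP_flatMap {A B : Type} (l : List A) (f : A → List B) (p : B → Bool) :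
    ((l.flatMap f).countP p : Int) = (l.map (fun a => ((f a).countP p : Int))).sum := by
  induction l with
  | nil => rfl
  | cons x t ih => simp [List.flatMap_cons, List.countP_append, ih]

theorem pv_nodup_flatMap {l : List Nat} (hl : l.Nodup) (f : Nat → List (Int × Int))
    (hf : ∀ i, (f i).Nodup) (ht : ∀ i p, p ∈ f i → p.1 = (i : Int)) : (l.flatMap f).Nodup := by
  induction l with
  | nil => exact List.nodup_nil
  | cons x t ih =>
    rw [List.flatMap_cons, List.nodup_append]
    refine ⟨hf x, ih hl.of_cons, ?_⟩
    intro a ha b hb heq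
    rcases List.mem_flatMap.mp hb with ⟨i, hi, hbi⟩
    have h1 := ht x a ha
    have h2 := ht i b hbi
    have hxi : x ≠ i := fun hxi => (List.nodup_cons.mp hl).1 (hxi ▸ hi)
    exact hxi (by exact_mod_cast h1.symm.trans (heq ▸ h2))

-- ---- Dict.mk lookup facts ----
theorem pv_get?_mk_append {K V : Type} [BEq K] [LawfulBEq K] (xs ys : List (K × V)) (a : K)
    (h : ∀ p ∈ xs, p.1 ≠ a) : (PySem.Dict.mk (xs ++ ys)).get? a = (PySem.Dict.mk ys).get? a := by
  induction xs with
  | nil => rfl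
  | cons x t ih =>
    cases x with
    | mk k v =>
      rw [List.cons_append, PySem.Dict.get?_mk_cons, if_neg, ih (fun p hp => h p (List.mem_cons_of_mem _ hp))]
      simp only [beq_iff_eq]
      exact h (k, v) List.mem_cons_self

theorem pv_get?_mk_map_self {V : Type} (l : List String) (f : String → V) (s : String) (hs : s ∈ l) :
    (PySem.Dict.mk (l.map (fun x => (x, f x)))).get? s = some (f s) := by
  induction l with
  | nil => cases hs
  | cons x t ih =>
    rw [List.map_cons, PySem.Dict.get?_mk_cons]
    by_cases hx : x = s
    · simp [hx]
    · rw [if_neg (by simp [hx]), ih (by rcases List.mem_cons.mp hs with h | h; exact absurd h.symm hx; exact h)]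

-- ---- the inner (states) loop of A is one insert of a fully built inner dict ----
theorem pv_inner_fold (v : String → Int) (k : Int) (l : List String) :
    ∀ (d : PySem.Dict String Int) (em : PySem.Dict Int (PySem.Dict String Int)),
    l.foldl (fun em s => PySem.Dict.insert em k
        (PySem.Dict.insert (PySem.Dict.getD em k PySem.Dict.empty) s (v s))) (em.insert k d)
      = em.insert k (l.foldl (fun d s => PySem.Dict.insert d s (v s)) d) := by
  induction l with
  | nil => intro d em; rfl
  | cons s t ih =>
    intro d em
    simp only [List.foldl_cons]
    rw [PySem.Dict.getD_insert_self, PySem.Dict.insert_insert_self]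
    exact ih _ em

theorem pv_inner_fold' (v : String → Int) (k : Int) (l : List String) (hl : l ≠ []) (em : PySem.Dict Int (PySem.Dict String Int)) :
    l.foldl (fun em s => PySem.Dict.insert em k
        (PySem.Dict.insert (PySem.Dict.getD em k PySem.Dict.empty) s (v s))) em
      = em.insert k (l.foldl (fun d s => PySem.Dict.insert d s (v s)) (PySem.Dict.getD em k PySem.Dict.empty)) := by
  cases l with
  | nil => cases hl rfl
  | cons s t =>
    rw [List.foldl_cons, List.foldl_cons]
    exact pv_inner_fold v k t _ em

theorem pv_bodyA_eq (train_data : List (String × List (List String))) (test_data : List (List (List String)))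
    (em : PySem.Dict Int (PySem.Dict String Int)) (k : Int) :
    pvBodyA train_data test_data em k = em.insert k
      (pvStates.foldl (fun d s => PySem.Dict.insert d s ((pvProb train_data test_data k s).sum + 1))
        (PySem.Dict.getD em k PySem.Dict.empty)) := by
  unfold pvBodyA
  exact pv_inner_fold' (fun s => (pvProb train_data test_data k s).sum + 1) k pvStates (by simp [pvStates]) em

-- ---- the outer (test chars) loop of A ----
theorem pv_outer_fold (F : Int → PySem.Dict String Int → PySem.Dict String Int) (ks : List Int) :
    ∀ (pre : List (Int × PySem.Dict String Int)), ks.Nodup →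
    (∀ k ∈ ks, ∀ p ∈ pre, p.1 ≠ k) →
    ks.foldl (fun em k => em.insert k (F k (PySem.Dict.getD em k PySem.Dict.empty)))
        (PySem.Dict.mk (pre ++ ks.map (fun i => (i, PySem.Dict.empty))))
      = PySem.Dict.mk (pre ++ ks.map (fun i => (i, F i PySem.Dict.empty))) := by
  induction ks with
  | nil => intro pre _ _; rfl
  | cons k t ih =>
    intro pre hnd hdis
    simp only [List.foldl_cons, List.map_cons]
    have hget : (PySem.Dict.mk (pre ++ (k, PySem.Dict.empty) :: t.map (fun i => (i, PySem.Dict.empty)))).get? k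
        = some PySem.Dict.empty := by
      rw [pv_get?_mk_append _ _ _ (fun p hp => hdis k List.mem_cons_self p hp), PySem.Dict.get?_mk_cons]
      simp
    have hgetD : PySem.Dict.getD (PySem.Dict.mk (pre ++ (k, PySem.Dict.empty) :: t.map (fun i => (i, PySem.Dict.empty)))) k PySem.Dict.empty = PySem.Dict.empty := by
      rw [PySem.Dict.getD_eq_get?_getD, hget]; rfl
    have hcont : (PySem.Dict.mk (pre ++ (k, PySem.Dict.empty) :: t.map (fun i => (i, PySem.Dict.empty)))).contains k = true := by
      rw [PySem.Dict.contains_eq_isSome_get?, hget]; rfl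
    have hins : (PySem.Dict.mk (pre ++ (k, PySem.Dict.empty) :: t.map (fun i => (i, PySem.Dict.empty)))).insert k (F k PySem.Dict.empty)
        = PySem.Dict.mk ((pre ++ [(k, F k PySem.Dict.empty)]) ++ t.map (fun i => (i, PySem.Dict.empty))) := by
      apply PySem.Dict.ext
      rw [PySem.Dict.items_insert_of_contains _ _ hcont]
      have h1 : pre.map (fun p => if (p.1 == k) = true then (k, F k PySem.Dict.empty) else p) = pre := by
        conv_rhs => rw [← List.map_id pre]
        apply List.map_congr_left
        intro p hp
        simp [show ¬ (p.1 = k) from fun hpk => hdis k List.mem_cons_self p (by simpa using hp) hpk]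
      have h2 : (t.map (fun i => (i, PySem.Dict.empty))).map (fun p => if (p.1 == k) = true then (k, F k PySem.Dict.empty) else p) = t.map (fun i => (i, PySem.Dict.empty)) := by
        rw [List.map_map]
        apply List.map_congr_left
        intro i hi
        have : ¬ (i = k) := fun hik => (List.nodup_cons.mp hnd).1 (hik ▸ hi)
        simp [this]
      show (pre ++ (k, PySem.Dict.empty) :: t.map (fun i => (i, PySem.Dict.empty))).map _ = _
      rw [List.map_append, List.map_cons, h1, h2]
      simp
    rw [hgetD, hins, ih (pre ++ [(k, F k PySem.Dict.empty)]) (List.nodup_cons.mp hnd).2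
      (fun k' hk' p hp => by
        rcases List.mem_append.mp hp with h | h
        · exact hdis k' (List.mem_cons_of_mem _ hk') p h
        · have : p = (k, F k PySem.Dict.empty) := by simpa using h
          subst this
          exact fun hkk' => (List.nodup_cons.mp hnd).1 (by simpa [← hkk'] using hk'))]
    simp

theorem pvStates_nodup : pvStates.Nodup := by decide

theorem pv_innerD_items (v : String → Int) :
    (pvStates.foldl (fun d s => PySem.Dict.insert d s (v s)) PySem.Dict.empty).items
      = pvStates.map (fun s => (s, v s)) := by
  have h := PySem.Dict.items_foldl_insert_fresh (l := pvStates) (k := fun s => s)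
    (v := v) (d := PySem.Dict.empty) (fun a _ => PySem.Dict.contains_empty a)
    (by simpa using pvStates_nodup)
  simpa using h

theorem pv_range_cast_nodup (n : Nat) : ((List.range n).map (fun k : Nat => (k : Int))).Nodup := by
  refine List.Nodup.map ?_ List.nodup_range
  exact fun a b h => by exact_mod_cast h

-- A returns, for each test char k in order, the list of (state, score) pairs in states order
theorem pv_find_eq (train_data : List (String × List (List String))) (test_data : List (List (List String))) :
    find_emission train_data test_data
      = (List.range test_data.length).map (fun k : Nat =>
          ((k : Int), pvStates.map (fun s => (s, (pvProb train_data test_data (k : Int) s).sum + 1)))) := by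
  have hb : pvBodyA train_data test_data = fun em k => em.insert k
      ((fun k d => pvStates.foldl (fun d s => PySem.Dict.insert d s ((pvProb train_data test_data k s).sum + 1)) d) k
        (PySem.Dict.getD em k PySem.Dict.empty)) :=
    funext fun em => funext fun k => pv_bodyA_eq train_data test_data em k
  have h1 : find_emission train_data test_data
      = ((PySem.List.pyRange 0 (test_data.length : Int) 1).foldl (pvBodyA train_data test_data)
          (PySem.Dict.mk ((PySem.List.pyRange 0 (test_data.length : Int) 1).map (fun i => (i, PySem.Dict.empty))))).items.map
            (fun p => (p.1, p.2.items)) := rfl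
  rw [h1, PySem.List.pyRange_zero_nat, hb]
  have hout : ((List.range test_data.length).map (fun k : Nat => (k : Int))).foldl
        (fun em k => em.insert k ((fun k d => pvStates.foldl (fun d s => PySem.Dict.insert d s ((pvProb train_data test_data k s).sum + 1)) d) k
          (PySem.Dict.getD em k PySem.Dict.empty)))
        (PySem.Dict.mk (((List.range test_data.length).map (fun k : Nat => (k : Int))).map (fun i => (i, PySem.Dict.empty))))
      = PySem.Dict.mk (((List.range test_data.length).map (fun k : Nat => (k : Int))).map
          (fun i => (i, (fun k d => pvStates.foldl (fun d s => PySem.Dict.insert d s ((pvProb train_data test_data k s).sum + 1)) d) i PySem.Dict.empty))) := by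
    have h := pv_outer_fold
      (fun k d => pvStates.foldl (fun d s => PySem.Dict.insert d s ((pvProb train_data test_data k s).sum + 1)) d)
      ((List.range test_data.length).map (fun k : Nat => (k : Int))) []
      (pv_range_cast_nodup _) (fun _ _ p hp => absurd hp List.not_mem_nil)
    rw [List.nil_append, List.nil_append] at h
    exact h
  rw [hout]
  simp only [List.map_map]
  apply List.map_congr_left
  intro k _
  simp only [Function.comp]
  rw [pv_innerD_items]

def pvNcols (g : List (List String)) : Int := match g with | [] => 0 | r :: _ => (r.length : Int)

theorem pv_enumerate_eq {α : Type} (xs : List α) (d : α) :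
    PySem.List.enumerate xs 0
      = (List.range xs.length).map (fun k : Nat => ((k : Int), PySem.List.pyGetD xs (k : Int) d)) := by
  rw [PySem.List.enumerate_eq_map_pyRange xs d,
    show PySem.List.len xs = ((xs.length : Nat) : Int) from rfl, PySem.List.pyRange_zero_nat, List.map_map]
  rfl

theorem pv_alt_eq (train_data : List (String × List (List String))) (test_data : List (List (List String))) :
    find_emission_alt train_data test_data
      = (List.range test_data.length).map (fun k : Nat =>
          ((k : Int), pvStates.map (fun s =>
            (s, ((PySem.Set.inter (pvTestStars (test_data.getD k []) (pvNcols (test_data.getD k [])))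
                   (pvStars (PySem.Dict.getD (PySem.Dict.mk train_data) s []))).length : Int) + 1)))) := by
  have h1 : find_emission_alt train_data test_data
      = (PySem.List.enumerate test_data 0).map (fun p =>
          (p.1, pvStates.map (fun s =>
            (s, ((PySem.Set.inter (pvTestStars p.2 (pvNcols p.2))
                   (PySem.Dict.getD (PySem.Dict.mk (pvStates.map (fun s =>
                     (s, pvStars (PySem.Dict.getD (PySem.Dict.mk train_data) s []))))) s PySem.Set.empty)).length : Int) + 1)))) := rfl
  rw [h1, pv_enumerate_eq test_data [], List.map_map]
  apply List.map_congr_left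
  intro k _
  simp only [Function.comp, PySem.List.pyGetD_natCast]
  refine congrArg (fun L => ((k : Int), L)) (List.map_congr_left ?_)
  intro s hs
  rw [PySem.Dict.getD_eq_get?_getD, pv_get?_mk_map_self _ _ s hs]
  rfl

theorem pv_sum_ite_count {A : Type} (l : List A) (p : A → Prop) [DecidablePred p] :
    (l.map (fun x => if p x then (1 : Int) else 0)).sum = (l.countP (fun x => decide (p x)) : Int) := by
  induction l with
  | nil => rfl
  | cons x t ih =>
    by_cases h : p x
    · simp [h, ih]; omega
    · simp [h, ih]

theorem pv_filter_trunc (m C : Nat) (h : C ≤ m) (p : Nat → Bool) :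
    (List.range m).filter (fun j : Nat => decide ((j : Int) < (C : Int)) && p j) = (List.range C).filter p := by
  rw [show m = C + (m - C) from (Nat.add_sub_cancel' h).symm, List.range_add, List.filter_append]
  have h1 : (List.range C).filter (fun j : Nat => decide ((j : Int) < (C : Int)) && p j) = (List.range C).filter p := by
    apply List.filter_congr
    intro j hj
    have : (j : Int) < (C : Int) := by exact_mod_cast List.mem_range.mp hj
    simp [this]
  have h2 : (((List.range (m - C)).map (fun x => C + x)).filter (fun j : Nat => decide ((j : Int) < (C : Int)) && p j)) = [] := by
    rw [List.filter_eq_nil_iff]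
    intro a ha
    rcases List.mem_map.mp ha with ⟨x, _, rfl⟩
    simp
  rw [h1, h2, List.append_nil]

theorem pv_starList_eq (rows : List (List String)) (cond : Int → String → Bool) :
    pvStarList rows cond = (List.range rows.length).flatMap (fun i : Nat =>
      ((List.range (rows.getD i []).length).filter (fun j : Nat => cond (j : Int) ((rows.getD i []).getD j ""))).map
        (fun j : Nat => ((i : Int), (j : Int)))) := by
  unfold pvStarList
  rw [pv_enumerate_eq rows [], List.flatMap_map]
  refine congrArg (fun F => List.flatMap F (List.range rows.length)) (funext fun i => ?_)
  simp only [PySem.List.pyGetD_natCast]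
  rw [pv_enumerate_eq ((rows.getD i [])) "", List.filterMap_map]
  simp only [Function.comp, PySem.List.pyGetD_natCast]
  rw [pv_filterMap_ite (p := fun j : Nat => cond (j : Int) ((rows.getD i []).getD j "") = true)
    (f := fun j : Nat => ((i : Int), (j : Int)))]
  congr 1
  apply List.filter_congr
  intro j _
  simp

theorem pv_starList_nodup (rows : List (List String)) (cond : Int → String → Bool) :
    (pvStarList rows cond).Nodup := by
  rw [pv_starList_eq]
  apply pv_nodup_flatMap List.nodup_range
  · intro i
    refine List.Nodup.map ?_ (List.Nodup.filter _ List.nodup_range)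
    intro a b h
    have h2 := congrArg Prod.snd h
    simp only [Nat.cast_inj] at h2
    exact h2
  · intro i p hp
    rcases List.mem_map.mp hp with ⟨j, _, rfl⟩
    rfl

theorem pv_prob_eq (train_data : List (String × List (List String))) (test_data : List (List (List String)))
    (k : Nat) (s : String) :
    pvProb train_data test_data (k : Int) s
      = (List.range (test_data.getD k []).length).flatMap (fun i : Nat =>
          ((List.range ((test_data.getD k []).headD []).length).filter
             (fun j : Nat => ((test_data.getD k []).getD i []).getD j "" == "*")).map
            (fun j : Nat => if ((test_data.getD k []).getD i []).getD j ""
                = (((PySem.Dict.getD (PySem.Dict.mk train_data) s []).getD i []).getD j "") then (1 : Int) else 0)) := by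
  have h1 : pvProb train_data test_data (k : Int) s
      = (PySem.List.pyRange 0 ((PySem.List.pyGetD test_data (k : Int) []).length : Int) 1).flatMap (fun i =>
          (PySem.List.pyRange 0 ((PySem.List.pyGetD (PySem.List.pyGetD test_data (k : Int) []) 0 []).length : Int) 1).filterMap (fun j =>
            if PySem.List.pyGetD (PySem.List.pyGetD (PySem.List.pyGetD test_data (k : Int) []) i []) j "" = "*" then
              some (if PySem.List.pyGetD (PySem.List.pyGetD (PySem.List.pyGetD test_data (k : Int) []) i []) j ""
                      = PySem.List.pyGetD (PySem.List.pyGetD (PySem.Dict.getD (PySem.Dict.mk train_data) s []) i []) j "" then (1 : Int) else 0)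
            else none)) := rfl
  rw [h1]
  simp only [PySem.List.pyGetD_natCast]
  have h0 : PySem.List.pyGetD (test_data.getD k []) 0 [] = (test_data.getD k []).headD [] := by
    rw [PySem.List.pyGetD_ofNat']
    cases test_data.getD k [] <;> rfl
  rw [h0, PySem.List.pyRange_zero_nat, PySem.List.pyRange_zero_nat, List.flatMap_map]
  refine congrArg (fun F => List.flatMap F (List.range (test_data.getD k []).length)) (funext fun i => ?_)
  simp only [PySem.List.pyGetD_natCast]
  rw [List.filterMap_map]
  simp only [Function.comp, PySem.List.pyGetD_natCast]
  rw [pv_filterMap_ite (p := fun j : Nat => ((test_data.getD k []).getD i []).getD j "" = "*")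
    (f := fun j : Nat => if ((test_data.getD k []).getD i []).getD j ""
        = ((PySem.Dict.getD (PySem.Dict.mk train_data) s []).getD i []).getD j "" then (1 : Int) else 0)]
  congr 1

theorem pv_val_core (g t : List (List String))
    (hrow : ∀ i < g.length, ∀ j < (g.headD []).length, j < (g.getD i []).length)
    (hstar : ∀ i < g.length, ∀ j < (g.headD []).length, (g.getD i []).getD j "" = "*" →
       i < t.length ∧ j < (t.getD i []).length) :
    ((List.range g.length).flatMap (fun i : Nat =>
        ((List.range (g.headD []).length).filter (fun j : Nat => (g.getD i []).getD j "" == "*")).map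
          (fun j : Nat => if (g.getD i []).getD j "" = (t.getD i []).getD j "" then (1 : Int) else 0))).sum
      = ((PySem.Set.inter (pvTestStars g (pvNcols g)) (pvStars t)).length : Int) := by
  have hNodupTest : (pvStarList g (fun j c => decide (j < pvNcols g) && (c == "*"))).Nodup :=
    pv_starList_nodup _ _
  have hRHS : PySem.Set.inter (pvTestStars g (pvNcols g)) (pvStars t)
      = (pvStarList g (fun j c => decide (j < pvNcols g) && (c == "*"))).filter
          (fun x => PySem.Set.contains (pvStars t) x) := by
    unfold pvTestStars
    rw [PySem.Set.ofList_eq_self_of_nodup _ hNodupTest]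
    rfl
  rw [pv_sum_flatMap, hRHS, ← List.countP_eq_length_filter, pv_starList_eq g _, pv_countP_flatMap]
  refine congrArg List.sum (List.map_congr_left fun i hi => ?_)
  have hiR : i < g.length := List.mem_range.mp hi
  rw [pv_sum_ite_count ((List.range (g.headD []).length).filter
      (fun j : Nat => (g.getD i []).getD j "" == "*"))
      (fun j : Nat => (g.getD i []).getD j "" = (t.getD i []).getD j "")]
  rw [List.countP_map]
  have hgne : g ≠ [] := by intro h; rw [h] at hiR; simp at hiR
  have hNc : pvNcols g = ((g.headD []).length : Int) := by
    cases g with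
    | nil => cases hgne rfl
    | cons r _ => rfl
  have hCle : (g.headD []).length ≤ (g.getD i []).length := by
    by_cases hC0 : (g.headD []).length = 0
    · omega
    · have := hrow i hiR ((g.headD []).length - 1) (by omega)
      omega
  have hfil : (List.range (g.getD i []).length).filter
        (fun j : Nat => (fun (j' : Int) (c : String) => decide (j' < pvNcols g) && (c == "*")) (j : Int) ((g.getD i []).getD j ""))
      = (List.range (g.headD []).length).filter (fun j : Nat => (g.getD i []).getD j "" == "*") := by
    rw [hNc]
    exact pv_filter_trunc _ _ hCle (fun j : Nat => (g.getD i []).getD j "" == "*")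
  rw [hfil]
  refine congrArg (fun n : Nat => (n : Int)) (List.countP_congr fun j hj => ?_)
  have hjC : j < (g.headD []).length := List.mem_range.mp (List.mem_filter.mp hj).1
  have hstarj : (g.getD i []).getD j "" = "*" := by simpa using (List.mem_filter.mp hj).2
  obtain ⟨hit, hjt⟩ := hstar i hiR j hjC hstarj
  simp only [Function.comp]
  rw [PySem.Set.contains_iff]
  unfold pvStars
  rw [PySem.Set.mem_ofList, pv_starList_eq]
  constructor
  · intro hd
    have hcell : (t.getD i []).getD j "" = "*" := by
      have hd' := of_decide_eq_true hd
      rw [← hd', hstarj]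
    refine List.mem_flatMap.mpr ⟨i, List.mem_range.mpr hit, ?_⟩
    refine List.mem_map.mpr ⟨j, ?_, rfl⟩
    exact List.mem_filter.mpr ⟨List.mem_range.mpr hjt, by simp only [beq_iff_eq]; exact hcell⟩
  · intro hd
    rcases List.mem_flatMap.mp hd with ⟨a, _, hm⟩
    rcases List.mem_map.mp hm with ⟨b, hbf, hab⟩
    have hai : a = i := by
      have := congrArg Prod.fst hab
      simpa [Nat.cast_inj] using this
    have hbj : b = j := by
      have := congrArg Prod.snd hab
      simpa [Nat.cast_inj] using this
    subst hai; subst hbj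
    have hcell : (t.getD a []).getD b "" = "*" := by simpa using (List.mem_filter.mp hbf).2
    exact decide_eq_true (by rw [hstarj, hcell])

theorem pv_val_eq (train_data : List (String × List (List String))) (test_data : List (List (List String)))
    (hPre : Pre_find_emission train_data test_data) (k : Nat) (hk : k < test_data.length)
    (s : String) (hs : s ∈ pvStates) :
    (pvProb train_data test_data (k : Int) s).sum
      = ((PySem.Set.inter (pvTestStars (test_data.getD k []) (pvNcols (test_data.getD k [])))
           (pvStars (PySem.Dict.getD (PySem.Dict.mk train_data) s []))).length : Int) := by
  have hgmem : test_data.getD k [] ∈ test_data := by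
    rw [List.getD_eq_getElem?_getD, List.getElem?_eq_getElem hk]
    exact List.getElem_mem hk
  have hPg := hPre _ hgmem
  rw [pv_prob_eq]
  apply pv_val_core
  · intro i hi j hj
    exact (hPg i hi j hj).1
  · intro i hi j hj hstarj
    have hok := (hPg i hi j hj).2 hstarj
    have hsok := List.all_eq_true.mp hok s hs
    cases hget : (PySem.Dict.mk train_data).get? s with
    | none => rw [hget] at hsok; simp at hsok
    | some tt =>
      rw [hget] at hsok
      simp only [Bool.and_eq_true, decide_eq_true_eq] at hsok
      have htt : PySem.Dict.getD (PySem.Dict.mk train_data) s [] = tt := by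
        rw [PySem.Dict.getD_eq_get?_getD, hget]
        rfl
      rw [htt]
      exact hsok

-- ===== VERDICT (by name: the statement is the Claim_ definition above) =====
theorem find_emission_spec : Claim_equal_find_emission := by
  intro train_data test_data _ hPre
  unfold Spec_find_emission
  rw [pv_find_eq, pv_alt_eq]
  apply List.map_congr_left
  intro k hk
  refine congrArg (fun L => ((k : Int), L)) (List.map_congr_left ?_)
  intro s hs
  rw [pv_val_eq train_data test_data hPre k (List.mem_range.mp hk) s hs]
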